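-- pv_equiv track=rewrite | github.com/yyyup/adjustment_blending | core.py | _group_sliding_frames
-- ===== SOURCE A (Python) =====
-- def _group_sliding_frames(sliding_frames):
--     """Group consecutive sliding frames into contact phases"""
--     if not sliding_frames:
--         return []
--
--     contact_phases = []
--     current_start = sliding_frames[0]
--     current_end = sliding_frames[0]
--
--     for frame in sliding_frames[1:]:
--         if frame == current_end + 1:
--             current_end = frame
--         else:
--             contact_phases.append((current_start, current_end))
--             current_start = current_end = frame
--
--     contact_phases.append((current_start, current_end))
--     return contact_phases
-- ===== SOURCE B (Python) =====
-- def _group_sliding_frames(sliding_frames):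
--     """Group consecutive sliding frames into contact phases (built back-to-front)."""
--     rev_phases = []
--     for frame in reversed(sliding_frames):
--         if rev_phases and rev_phases[-1][0] == frame + 1:
--             rev_phases[-1] = (frame, rev_phases[-1][1])
--         else:
--             rev_phases.append((frame, frame))
--     rev_phases.reverse()
--     return rev_phases
-- ===== Notes on version B (the rewrite author's own statement) =====
-- stated objective: alternative
-- what changed: B builds the phase list back-to-front: it iterates over the reversed input and either extends the most recent (front) segment when it starts at frame+1 or starts a new singleton segment, instead of A's forward loop maintaining current_start/current_end with a final flush.
import Mathlib
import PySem

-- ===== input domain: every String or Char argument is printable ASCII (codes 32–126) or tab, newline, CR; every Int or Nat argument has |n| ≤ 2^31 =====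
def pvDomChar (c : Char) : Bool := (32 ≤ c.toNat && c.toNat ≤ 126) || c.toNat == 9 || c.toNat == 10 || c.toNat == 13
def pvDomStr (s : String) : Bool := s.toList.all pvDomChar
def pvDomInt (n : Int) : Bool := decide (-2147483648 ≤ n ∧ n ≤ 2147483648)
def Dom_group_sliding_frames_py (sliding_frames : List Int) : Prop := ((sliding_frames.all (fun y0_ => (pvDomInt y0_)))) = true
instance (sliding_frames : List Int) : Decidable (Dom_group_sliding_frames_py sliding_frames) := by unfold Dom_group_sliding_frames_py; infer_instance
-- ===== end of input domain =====

-- B builds the phase list back-to-front (reversed iteration, prepend/extend-front) instead of A's forward accumulator loop; objective: alternative.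


-- ===== PORT A =====
-- one loop iteration of A: state = (contact_phases, current_start, current_end)
def aStep (st : List (Int × Int) × Int × Int) (frame : Int) : List (Int × Int) × Int × Int :=
  if frame = st.2.2 + 1 then (st.1, st.2.1, frame)
  else (st.1 ++ [(st.2.1, st.2.2)], frame, frame)

def group_sliding_frames_py (sliding_frames : List Int) : List (Int × Int) :=
  match sliding_frames with
  | [] => []
  | f0 :: rest =>
    let st := rest.foldl aStep ([], f0, f0)
    st.1 ++ [(st.2.1, st.2.2)]

-- ===== PORT B =====
-- one loop iteration of B: rev_phases is kept head-first (Lean cons = Python append at the end of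
-- rev_phases), so Python's final rev_phases.reverse() is the identity on this representation;
-- the step either extends the most recent phase or starts a new singleton phase
def bStep (phases : List (Int × Int)) (frame : Int) : List (Int × Int) :=
  match phases with
  | (s, e) :: rest =>
      if s = frame + 1 then (frame, e) :: rest else (frame, frame) :: (s, e) :: rest
  | [] => [(frame, frame)]

def group_sliding_frames_py_alt (sliding_frames : List Int) : List (Int × Int) :=
  sliding_frames.reverse.foldl bStep []

-- ===== PRECONDITION & SPEC =====
def Spec_group_sliding_frames_py (sliding_frames : List Int) (out : List (Int × Int)) : Prop := out = group_sliding_frames_py_alt sliding_frames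
instance (sliding_frames : List Int) (out : List (Int × Int)) : Decidable (Spec_group_sliding_frames_py sliding_frames out) := by unfold Spec_group_sliding_frames_py; infer_instance

-- ===== CLAIM (what is proved, stated in full; the proofs are below) =====
def Claim_equal_group_sliding_frames_py : Prop := ∀ (sliding_frames : List Int), Dom_group_sliding_frames_py sliding_frames → Spec_group_sliding_frames_py sliding_frames (group_sliding_frames_py sliding_frames)

-- ===== LEMMAS AND PROOFS =====

-- canonical recursive grouping: pvGo s e l = phases of the run starting (s,e) followed by l
def pvGo (s e : Int) : List Int → List (Int × Int)
  | [] => [(s, e)]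
  | f :: rest => if f = e + 1 then pvGo s f rest else (s, e) :: pvGo f f rest

-- the end of the first phase / the remaining phases, independent of the start s
def pvC (e : Int) : List Int → Int
  | [] => e
  | f :: rest => if f = e + 1 then pvC f rest else e

def pvT (e : Int) : List Int → List (Int × Int)
  | [] => []
  | f :: rest => if f = e + 1 then pvT f rest else pvGo f f rest

theorem pvGo_decomp : ∀ (l : List Int) (s e : Int), pvGo s e l = (s, pvC e l) :: pvT e l := by
  intro l
  induction l with
  | nil => intro s e; simp [pvGo, pvC, pvT]
  | cons f rest ih =>
    intro s e
    by_cases h : f = e + 1 <;> simp [pvGo, pvC, pvT, h, ih]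

theorem aFold (l : List Int) : ∀ (acc : List (Int × Int)) (s e : Int),
    (let st := l.foldl aStep (acc, s, e); st.1 ++ [(st.2.1, st.2.2)]) = acc ++ pvGo s e l := by
  induction l with
  | nil => intro acc s e; simp [pvGo]
  | cons f rest ih =>
    intro acc s e
    by_cases h : f = e + 1 <;> simp [pvGo, aStep, h, ih]

theorem bFold : ∀ (rest : List Int) (x : Int),
    (x :: rest).foldr (fun frame phases => bStep phases frame) [] = pvGo x x rest := by
  intro rest
  induction rest with
  | nil => intro x; simp [pvGo, bStep]
  | cons y r ih =>
    intro x
    rw [List.foldr_cons, ih y, pvGo_decomp r y y]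
    by_cases h : y = x + 1
    · simp [bStep, h, pvGo]
      exact (pvGo_decomp r x (x + 1)).symm
    · simp [bStep, h, pvGo, pvGo_decomp r y y]

-- ===== VERDICT (by name: the statement is the Claim_ definition above) =====
theorem group_sliding_frames_py_spec : Claim_equal_group_sliding_frames_py := by
  intro xs _
  unfold Spec_group_sliding_frames_py group_sliding_frames_py group_sliding_frames_py_alt
  cases xs with
  | nil => simp
  | cons x rest =>
    rw [List.foldl_reverse]
    simpa using (aFold rest [] x x).trans (bFold rest x).symm
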